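-- pv_equiv track=rewrite | github.com/pypi-data/pypi-mirror-359 | packages/scrive/scrive-0.2.0.tar.gz/scrive-0.2.0/scrive/core.py | _create_optional_pattern
-- ===== SOURCE A (Python) =====
-- def _create_optional_pattern(suffix1: str, suffix2: str) -> str:
--     """Create optional pattern from two suffixes (e.g., 'g' and 'eg' -> 'e?g')."""
--     if not suffix1 or not suffix2:
--         return ""
--
--     # Case 1: One suffix is empty, other is single char or short
--     if suffix1 == "" and len(suffix2) <= 3:
--         return f"{suffix2}?"
--     elif suffix2 == "" and len(suffix1) <= 3:
--         return f"{suffix1}?"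
--
--     # Case 2: One is a single char extension of the other
--     if len(suffix1) == len(suffix2) + 1:
--         # suffix1 is longer, check if it's suffix2 + one char
--         if suffix1.endswith(suffix2):
--             missing_char = suffix1[: -len(suffix2)] if suffix2 else suffix1[-1]
--             if len(missing_char) == 1:
--                 return f"{missing_char}?{suffix2}"
--         # Check if suffix1 starts with extra char
--         elif suffix1[1:] == suffix2:
--             return f"{suffix1[0]}?{suffix2}"
--     elif len(suffix2) == len(suffix1) + 1:
--         # suffix2 is longer
--         if suffix2.endswith(suffix1):
--             missing_char = suffix2[: -len(suffix1)] if suffix1 else suffix2[-1]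
--             if len(missing_char) == 1:
--                 return f"{missing_char}?{suffix1}"
--         # Check if suffix2 starts with extra char
--         elif suffix2[1:] == suffix1:
--             return f"{suffix2[0]}?{suffix1}"
--
--     # Case 3: More complex patterns - look for insertions
--     if abs(len(suffix1) - len(suffix2)) == 1:
--         longer = suffix1 if len(suffix1) > len(suffix2) else suffix2
--         shorter = suffix2 if len(suffix1) > len(suffix2) else suffix1
--
--         # Try to find where the extra character is
--         for i in range(len(longer)):
--             if longer[:i] + longer[i + 1 :] == shorter:
--                 # Found the position of the extra character
--                 if i == 0:
--                     return f"{longer[0]}?{shorter}"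
--                 elif i == len(longer) - 1:
--                     return f"{shorter}{longer[-1]}?"
--                 else:
--                     return f"{longer[:i]}{longer[i]}?{longer[i + 1 :]}"
--
--     return ""
-- ===== SOURCE B (Python) =====
-- def _create_optional_pattern(suffix1: str, suffix2: str) -> str:
--     """Create optional pattern from two suffixes (e.g., 'g' and 'eg' -> 'e?g')."""
--     if not suffix1 or not suffix2:
--         return ""
--     if abs(len(suffix1) - len(suffix2)) != 1:
--         return ""
--     if len(suffix1) > len(suffix2):
--         longer, shorter = suffix1, suffix2
--     else:
--         longer, shorter = suffix2, suffix1
--     # length of the longest common suffix, scanning from the ends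
--     r1, r2 = longer[::-1], shorter[::-1]
--     s = 0
--     while s < len(shorter) and r1[s] == r2[s]:
--         s += 1
--     # smallest index whose deletion from longer could give shorter
--     i = len(shorter) - s
--     if longer[:i] + longer[i + 1:] != shorter:
--         return ""
--     if i == 0:
--         return f"{longer[0]}?{shorter}"
--     if i == len(longer) - 1:
--         return f"{shorter}{longer[-1]}?"
--     return f"{longer[:i]}{longer[i]}?{longer[i + 1:]}"
-- ===== Notes on version B (the rewrite author's own statement) =====
-- stated objective: alternative
-- what changed: A scans every deletion position i of the longer string, rebuilding and comparing two slices per position (plus a redundant special case for a leading extra char); B computes the longest common suffix of the two strings in one ends-inward scan, which pins down the smallest valid deletion index directly, verifies it with a single comparison, and formats the same way.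
import Mathlib
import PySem

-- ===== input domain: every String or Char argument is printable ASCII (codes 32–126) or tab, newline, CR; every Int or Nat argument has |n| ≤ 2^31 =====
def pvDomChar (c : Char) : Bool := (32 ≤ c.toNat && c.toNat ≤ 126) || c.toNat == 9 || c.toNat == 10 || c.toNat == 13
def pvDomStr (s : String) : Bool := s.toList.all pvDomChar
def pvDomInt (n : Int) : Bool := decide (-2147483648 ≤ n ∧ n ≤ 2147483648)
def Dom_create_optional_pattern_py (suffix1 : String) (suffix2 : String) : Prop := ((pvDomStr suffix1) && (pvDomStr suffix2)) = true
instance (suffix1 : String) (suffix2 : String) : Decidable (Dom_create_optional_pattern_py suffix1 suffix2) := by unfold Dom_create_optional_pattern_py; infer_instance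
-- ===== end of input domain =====

-- B replaces A's scan over all deletion positions (each comparing whole slices) by a single
-- ends-inward scan computing the longest common suffix, which pins down the one candidate
-- deletion index; an alternative decomposition with the same return value everywhere.

-- ===== PORT A =====
-- Case-2 body of A (the two Python branches are verbatim mirror images; x is the longer string)
def pvCase2Body (x y : List Char) : Option (List Char) :=
  if PySem.Chars.endswith x y then
    let missing := if y ≠ [] then PySem.List.slice x none (some (-(y.length : Int)))
                   else [PySem.List.pyGetD x (-1) ' ']  -- unreachable: y is nonempty whenever pvCase2Body is reached
    if missing.length = 1 then some (missing ++ '?' :: y) else none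
  else if PySem.List.slice x (some 1) none = y then
    some (PySem.List.pyGetD x 0 ' ' :: '?' :: y)       -- loop index provably in range, so pyGetD is exact
  else none

-- A's Case-3 loop: first i in range(len(longer)) with longer[:i]+longer[i+1:] == shorter
def pvLoopA (longer shorter : List Char) : List Int → List Char
  | [] => []
  | i :: rest =>
    if PySem.List.slice longer none (some i) ++ PySem.List.slice longer (some (i + 1)) none = shorter then
      if i = 0 then
        PySem.List.pyGetD longer 0 ' ' :: '?' :: shorter
      else if i = (longer.length : Int) - 1 then
        shorter ++ [PySem.List.pyGetD longer (-1) ' ', '?']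
      else
        PySem.List.slice longer none (some i) ++
          PySem.List.pyGetD longer i ' ' :: '?' :: PySem.List.slice longer (some (i + 1)) none
    else pvLoopA longer shorter rest

def pvCoreA (a b : List Char) : List Char :=
  if a = [] ∨ b = [] then []
  else if a = [] ∧ b.length ≤ 3 then b ++ ['?']      -- Python's Case 1 (unreachable after the guard)
  else if b = [] ∧ a.length ≤ 3 then a ++ ['?']
  else
    match (if a.length = b.length + 1 then pvCase2Body a b
           else if b.length = a.length + 1 then pvCase2Body b a
           else none) with
    | some r => r
    | none =>
      if ((a.length : Int) - (b.length : Int)).natAbs = 1 then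
        let longer := if a.length > b.length then a else b
        let shorter := if a.length > b.length then b else a
        pvLoopA longer shorter (PySem.List.pyRange 0 (longer.length : Int) 1)
      else []

def create_optional_pattern_py (suffix1 : String) (suffix2 : String) : String :=
  String.ofList (pvCoreA suffix1.toList suffix2.toList)

-- ===== PORT B =====
-- B helper: the while loop over the two reversed strings (longest-common-prefix length)
def pvCp : List Char → List Char → Nat
  | x :: xs, y :: ys => if x = y then pvCp xs ys + 1 else 0
  | _, _ => 0

def pvCoreB (a b : List Char) : List Char :=
  if a = [] ∨ b = [] then []
  else if ((a.length : Int) - (b.length : Int)).natAbs ≠ 1 then []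
  else
    let longer := if a.length > b.length then a else b
    let shorter := if a.length > b.length then b else a
    let s := pvCp longer.reverse shorter.reverse
    let i := shorter.length - s
    if longer.take i ++ longer.drop (i + 1) ≠ shorter then []
    else if i = 0 then longer.getD 0 ' ' :: '?' :: shorter
    else if i = longer.length - 1 then shorter ++ [longer.getD (longer.length - 1) ' ', '?']
    else longer.take i ++ longer.getD i ' ' :: '?' :: longer.drop (i + 1)

def create_optional_pattern_py_alt (suffix1 : String) (suffix2 : String) : String :=
  String.ofList (pvCoreB suffix1.toList suffix2.toList)

-- ===== PRECONDITION & SPEC =====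
def Spec_create_optional_pattern_py (suffix1 : String) (suffix2 : String) (out : String) : Prop := out = create_optional_pattern_py_alt suffix1 suffix2
instance (suffix1 : String) (suffix2 : String) (out : String) : Decidable (Spec_create_optional_pattern_py suffix1 suffix2 out) := by unfold Spec_create_optional_pattern_py; infer_instance

-- ===== CLAIM (what is proved, stated in full; the proofs are below) =====
def Claim_equal_create_optional_pattern_py : Prop := ∀ (suffix1 : String) (suffix2 : String), Dom_create_optional_pattern_py suffix1 suffix2 → Spec_create_optional_pattern_py suffix1 suffix2 (create_optional_pattern_py suffix1 suffix2)

-- ===== LEMMAS AND PROOFS =====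

-- 'deleting index i from L yields S'
def pvValid (L S : List Char) (i : Nat) : Prop := L.take i ++ L.drop (i + 1) = S

-- B's computation after its guards (proof-side name for the tail of pvCoreB)
def pvBtail (L S : List Char) : List Char :=
  let s := pvCp L.reverse S.reverse
  let i := S.length - s
  if L.take i ++ L.drop (i + 1) ≠ S then []
  else if i = 0 then L.getD 0 ' ' :: '?' :: S
  else if i = L.length - 1 then S ++ [L.getD (L.length - 1) ' ', '?']
  else L.take i ++ L.getD i ' ' :: '?' :: L.drop (i + 1)


theorem pvCp_le_right (u v : List Char) : pvCp u v ≤ v.length := by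
  induction u generalizing v with
  | nil => simp [pvCp]
  | cons x xs ih =>
    cases v with
    | nil => simp [pvCp]
    | cons y ys =>
      by_cases hxy : x = y
      · simpa [pvCp, hxy] using ih ys
      · simp [pvCp, hxy]

theorem pvCp_take (u v : List Char) : u.take (pvCp u v) = v.take (pvCp u v) := by
  induction u generalizing v with
  | nil => simp [pvCp]
  | cons x xs ih =>
    cases v with
    | nil => simp [pvCp]
    | cons y ys =>
      by_cases hxy : x = y
      · simp [pvCp, hxy, List.take_succ_cons, ih ys]
      · simp [pvCp, hxy]

theorem pvCp_max (u v : List Char) : ∀ (k : Nat), k ≤ u.length → k ≤ v.length →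
    u.take k = v.take k → k ≤ pvCp u v := by
  induction u generalizing v with
  | nil =>
    intro k hk _ _
    have hk0 : k = 0 := by simpa using hk
    exact hk0 ▸ Nat.zero_le _
  | cons x xs ih =>
    intro k hku hkv h
    cases v with
    | nil => simp at hkv; omega
    | cons y ys =>
      cases k with
      | zero => exact Nat.zero_le _
      | succ n =>
        simp only [List.take_succ_cons, List.cons.injEq] at h
        obtain ⟨rfl, h2⟩ := h
        have := ih ys n (by simpa using hku) (by simpa using hkv) h2
        simp [pvCp]
        omega

theorem pvCs_drop (L S : List Char) :
    L.drop (L.length - pvCp L.reverse S.reverse) = S.drop (S.length - pvCp L.reverse S.reverse) := by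
  have h := pvCp_take L.reverse S.reverse
  rw [List.take_reverse, List.take_reverse] at h
  have := congrArg List.reverse h
  simpa using this

theorem pvCs_max (L S : List Char) : ∀ (k : Nat), k ≤ L.length → k ≤ S.length →
    L.drop (L.length - k) = S.drop (S.length - k) → k ≤ pvCp L.reverse S.reverse := by
  intro k hkL hkS h
  apply pvCp_max L.reverse S.reverse k (by simpa using hkL) (by simpa using hkS)
  rw [List.take_reverse, List.take_reverse, h]

theorem pvValid_split (L S : List Char) (j : Nat) (h : L.length = S.length + 1)
    (hj : j ≤ S.length) (hv : pvValid L S j) : L.take j = S.take j ∧ L.drop (j + 1) = S.drop j := by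
  unfold pvValid at hv
  have h1 : (L.take j).length = j := by simp; omega
  have h2 : (S.take j).length = j := by simp; omega
  have := hv.trans (List.take_append_drop j S).symm
  exact List.append_inj this (h1.trans h2.symm)

-- the smallest-valid-index lemma: any valid deletion index forces validity at i0 = |S| - s
theorem pvKey (L S : List Char) (j : Nat) (h : L.length = S.length + 1) (hj : j ≤ S.length)
    (hv : pvValid L S j) :
    S.length - pvCp L.reverse S.reverse ≤ j ∧ pvValid L S (S.length - pvCp L.reverse S.reverse) := by
  have hsS : pvCp L.reverse S.reverse ≤ S.length := by
    simpa using pvCp_le_right L.reverse S.reverse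
  set s := pvCp L.reverse S.reverse with hs
  obtain ⟨hTj, hDj⟩ := pvValid_split L S j h hj hv
  have hk2 : S.length - j ≤ s := by
    apply pvCs_max L S (S.length - j) (by omega) (by omega)
    have e1 : L.length - (S.length - j) = j + 1 := by omega
    have e2 : S.length - (S.length - j) = j := by omega
    rw [e1, e2]; exact hDj
  refine ⟨by omega, ?_⟩
  have hi0 : S.length - s ≤ j := by omega
  have ht : L.take (S.length - s) = S.take (S.length - s) := by
    have := congrArg (List.take (S.length - s)) hTj
    simpa [List.take_take, Nat.min_eq_left hi0] using this
  have hd : L.drop (S.length - s + 1) = S.drop (S.length - s) := by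
    have hd0 := pvCs_drop L S
    rw [← hs] at hd0
    have e : L.length - s = S.length - s + 1 := by omega
    rwa [e] at hd0
  unfold pvValid
  rw [ht, hd]
  exact List.take_append_drop _ S

theorem pvLoopA_skip (L S : List Char) (l1 l2 : List Int)
    (h : ∀ i ∈ l1, 0 ≤ i ∧ ¬ pvValid L S i.toNat) :
    pvLoopA L S (l1 ++ l2) = pvLoopA L S l2 := by
  induction l1 with
  | nil => simp
  | cons i rest ih =>
    obtain ⟨hi, hnv⟩ := h i (by simp)
    have hcond : PySem.List.slice L none (some i) ++ PySem.List.slice L (some (i + 1)) none ≠ S := by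
      rw [PySem.List.slice_to L hi, PySem.List.slice_from L (by omega)]
      have e : (i + 1).toNat = i.toNat + 1 := by omega
      rw [e]; exact hnv
    rw [List.cons_append]
    show pvLoopA L S (i :: (rest ++ l2)) = _
    rw [pvLoopA, if_neg hcond]
    exact ih (fun j hj => h j (by simp [hj]))

theorem pvLoopA_none (L S : List Char) (l : List Int)
    (h : ∀ i ∈ l, 0 ≤ i ∧ ¬ pvValid L S i.toNat) : pvLoopA L S l = [] := by
  have := pvLoopA_skip L S l [] h
  simpa [pvLoopA] using this

theorem pvLoopA_found (L S : List Char) (k : Nat) (l2 : List Int) (hk : pvValid L S k)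
    (h : L.length = S.length + 1) (_hS : S ≠ []) (hkn : k < L.length) :
    pvLoopA L S ((k : Int) :: l2) =
      (if k = 0 then L.getD 0 ' ' :: '?' :: S
       else if k = L.length - 1 then S ++ [L.getD (L.length - 1) ' ', '?']
       else L.take k ++ L.getD k ' ' :: '?' :: L.drop (k + 1)) := by
  unfold pvValid at hk
  have hL : L ≠ [] := by intro he; rw [he] at hkn; simp at hkn
  have hcast : ((k : Int) + 1) = ((k + 1 : Nat) : Int) := by push_cast; ring
  rw [pvLoopA, hcast, PySem.List.slice_to_natCast, PySem.List.slice_from_natCast, if_pos hk]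
  by_cases hk0 : k = 0
  · subst hk0
    simp [PySem.List.pyGetD_zero]
  · rw [if_neg (by exact_mod_cast hk0), if_neg hk0]
    by_cases hk1 : k = L.length - 1
    · have : (k : Int) = (L.length : Int) - 1 := by omega
      rw [if_pos this, if_pos hk1]
      congr 2
      rw [PySem.List.pyGetD_neg_one L ' ' hL, List.getLast_eq_getElem,
          List.getD_eq_getElem L ' ' (by omega)]
    · have : ¬ ((k : Int) = (L.length : Int) - 1) := by omega
      rw [if_neg this, if_neg hk1]
      simp

theorem pvLoop_eq_Btail (L S : List Char) (h : L.length = S.length + 1) (hS : S ≠ []) :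
    pvLoopA L S (PySem.List.pyRange 0 (L.length : Int) 1) = pvBtail L S := by
  have hsS : pvCp L.reverse S.reverse ≤ S.length := by
    simpa using pvCp_le_right L.reverse S.reverse
  set s := pvCp L.reverse S.reverse with hs
  set i0 := S.length - s with hi0d
  by_cases hv : pvValid L S i0
  · have hi0L : i0 < L.length := by omega
    have hinv : ∀ i ∈ PySem.List.pyRange 0 (i0 : Int) 1, 0 ≤ i ∧ ¬ pvValid L S i.toNat := by
      intro i hi
      rw [PySem.List.mem_pyRange_one] at hi
      refine ⟨hi.1, ?_⟩
      intro hval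
      have hle : i.toNat ≤ S.length := by omega
      have := (pvKey L S i.toNat h hle hval).1
      rw [← hs] at this
      omega
    rw [PySem.List.pyRange_one_append 0 (i0 : Int) (L.length : Int) (by positivity)
        (by exact_mod_cast hi0L.le)]
    rw [PySem.List.pyRange_one_cons (a := (i0 : Int)) (b := (L.length : Int))
        (by exact_mod_cast hi0L)]
    rw [pvLoopA_skip L S _ _ hinv]
    rw [pvLoopA_found L S i0 (PySem.List.pyRange ((i0 : Int) + 1) (L.length : Int) 1) hv h hS hi0L]
    have hv' : List.take i0 L ++ List.drop (i0 + 1) L = S := hv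
    simp only [pvBtail]
    rw [← hs, ← hi0d, if_neg (not_not_intro hv')]
  · rw [pvLoopA_none L S _ ?_]
    · have hv' : ¬ (List.take i0 L ++ List.drop (i0 + 1) L = S) := hv
      simp only [pvBtail]
      rw [← hs, ← hi0d, if_pos hv']
    · intro i hi
      rw [PySem.List.mem_pyRange_one] at hi
      refine ⟨hi.1, ?_⟩
      intro hval
      have hle : i.toNat ≤ S.length := by omega
      exact hv (pvKey L S i.toNat h hle hval).2

theorem pvCase2_endswith (L S : List Char) (h : L.length = S.length + 1) (hS : S ≠ [])
    (hE : PySem.Chars.endswith L S = true) :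
    pvCase2Body L S = some (pvBtail L S) := by
  obtain ⟨t, ht⟩ := (PySem.Chars.endswith_iff L S).mp hE
  have htl : t.length = 1 := by
    have := congrArg List.length ht
    simp at this; omega
  obtain ⟨c, rfl⟩ := List.length_eq_one_iff.mp htl
  have hSlen : 0 < S.length := List.length_pos_iff.mpr hS
  have hLc : L = c :: S := by simpa using ht.symm
  have hs_eq : pvCp L.reverse S.reverse = S.length := by
    have hle : pvCp L.reverse S.reverse ≤ S.length := by
      simpa using pvCp_le_right L.reverse S.reverse
    have hge : S.length ≤ pvCp L.reverse S.reverse := by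
      apply pvCs_max L S S.length (by omega) (by omega)
      simp [hLc]
    omega
  have hvalid : L.take 0 ++ L.drop 1 = S := by simp [hLc]
  unfold pvCase2Body pvBtail
  rw [if_pos hE, if_pos hS]
  rw [PySem.List.slice_to_neg_natCast L S.length hSlen]
  have e1 : L.length - S.length = 1 := by omega
  rw [e1]
  rw [hLc] at hs_eq ⊢
  simp only [List.reverse_cons] at hs_eq
  simp [hs_eq]

theorem pvCase2_none (L S : List Char) (_h : L.length = S.length + 1) (_hS : S ≠ [])
    (hE : ¬ PySem.Chars.endswith L S = true) : pvCase2Body L S = none := by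
  unfold pvCase2Body
  rw [if_neg hE, if_neg]
  intro hd
  rw [PySem.List.slice_from_one] at hd
  apply hE
  rw [PySem.Chars.endswith_iff]
  refine ⟨L.take 1, ?_⟩
  rw [← hd, ← List.drop_one]
  exact List.take_append_drop 1 L

theorem pvMain (L S : List Char) (h : L.length = S.length + 1) (hS : S ≠ []) :
    (match pvCase2Body L S with
     | some r => r
     | none => pvLoopA L S (PySem.List.pyRange 0 (L.length : Int) 1)) = pvBtail L S := by
  by_cases hE : PySem.Chars.endswith L S = true
  · rw [pvCase2_endswith L S h hS hE]
  · rw [pvCase2_none L S h hS hE]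
    exact pvLoop_eq_Btail L S h hS

theorem pvCoreA_eq_pvCoreB (a b : List Char) : pvCoreA a b = pvCoreB a b := by
  by_cases ha : a = []
  · simp [pvCoreA, pvCoreB, ha]
  by_cases hb : b = []
  · simp [pvCoreA, pvCoreB, hb]
  have h1 : ¬ (a = [] ∨ b = []) := by tauto
  have hal : 0 < a.length := List.length_pos_iff.mpr ha
  have hbl : 0 < b.length := List.length_pos_iff.mpr hb
  by_cases d1 : a.length = b.length + 1
  · have hgt : a.length > b.length := by omega
    have habs : ((a.length : Int) - (b.length : Int)).natAbs = 1 := by omega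
    have hA : pvCoreA a b =
        (match pvCase2Body a b with
         | some r => r
         | none => pvLoopA a b (PySem.List.pyRange 0 (a.length : Int) 1)) := by
      unfold pvCoreA
      rw [if_neg h1, if_neg (by tauto), if_neg (by tauto), if_pos d1]
      cases hcb : pvCase2Body a b with
      | some r => simp
      | none => simp [habs, if_pos hgt]
    have hB : pvCoreB a b = pvBtail a b := by
      unfold pvCoreB pvBtail
      rw [if_neg h1, if_neg (by omega)]
      simp [hgt]
    rw [hA, hB]
    exact pvMain a b d1 hb
  by_cases d2 : b.length = a.length + 1
  · have hgt : ¬ (a.length > b.length) := by omega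
    have habs : ((a.length : Int) - (b.length : Int)).natAbs = 1 := by omega
    have hA : pvCoreA a b =
        (match pvCase2Body b a with
         | some r => r
         | none => pvLoopA b a (PySem.List.pyRange 0 (b.length : Int) 1)) := by
      unfold pvCoreA
      rw [if_neg h1, if_neg (by tauto), if_neg (by tauto), if_neg (by omega), if_pos d2]
      cases hcb : pvCase2Body b a with
      | some r => simp
      | none => simp [habs, if_neg hgt]
    have hB : pvCoreB a b = pvBtail b a := by
      unfold pvCoreB pvBtail
      rw [if_neg h1, if_neg (by omega)]
      simp [hgt]
    rw [hA, hB]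
    exact pvMain b a d2 ha
  · have habs : ¬ (((a.length : Int) - (b.length : Int)).natAbs = 1) := by omega
    unfold pvCoreA pvCoreB
    rw [if_neg h1, if_neg (by tauto), if_neg (by tauto), if_neg d1, if_neg d2,
        if_neg h1, if_pos habs]
    simp [habs]

-- ===== VERDICT (by name: the statement is the Claim_ definition above) =====
theorem create_optional_pattern_py_spec : Claim_equal_create_optional_pattern_py := by
  intro s1 s2 _
  unfold Spec_create_optional_pattern_py create_optional_pattern_py create_optional_pattern_py_alt
  exact congrArg String.ofList (pvCoreA_eq_pvCoreB s1.toList s2.toList)
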